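-- pv_equiv track=rewrite | github.com/Viciooo/ASD | doKolosa3/doKolosa3/skojarzenieWdrzewie.py | solution
-- ===== SOURCE A (Python) =====
-- def solution(root,G):
--     n = len(G)
--     f = [0 for _ in range(n)]#braliśmy krawędź do tego wierzchołka
--     g = [0 for _ in range(n)]#nie bralismy
--     def dfsVisit(root):
--         maxi = 0
--         for v,w in G[root]:
--             dfsVisit(v)
--             g[root] += f[v]
--             f[root] += f[v]
--             maxi = max(maxi,g[v]-f[v]+w)
--         f[root] += maxi
--     dfsVisit(root)
--     return f,g
--
-- G = [[[1,1],[2,1]],[],[[3,1],[4,5]],[[5,1]],[],[[6,1]],[]]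
--
-- root = 0
-- ===== SOURCE B (Python) =====
-- def solution(root, G):
--     n = len(G)
--     # iterative traversal: collect nodes in visit order, then combine in reverse
--     order = [root]
--     i = 0
--     while i < len(order):
--         for v, w in G[order[i]]:
--             order.append(v)
--         i += 1
--     f = [0] * n
--     g = [0] * n
--     for u in reversed(order):
--         s = 0
--         best = 0
--         for v, w in G[u]:
--             s += f[v]
--             best = max(best, g[v] - f[v] + w)
--         g[u] = s
--         f[u] = s + best
--     return f, g
-- ===== Notes on version B (the rewrite author's own statement) =====
-- stated objective: alternative
-- what changed: The recursive closure-mutating DFS is replaced by an iterative two-phase pass: a worklist loop collects the visit order, then a single reverse fold over that order computes g[u] and f[u] of each node from its already-finalized children.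
-- outside the precondition, e.g. on solution(0, [[[-1, 5]], []]): A returns ([5, 0], [0, 0]), B returns ([5, 0], [0, 0])
import Mathlib
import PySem

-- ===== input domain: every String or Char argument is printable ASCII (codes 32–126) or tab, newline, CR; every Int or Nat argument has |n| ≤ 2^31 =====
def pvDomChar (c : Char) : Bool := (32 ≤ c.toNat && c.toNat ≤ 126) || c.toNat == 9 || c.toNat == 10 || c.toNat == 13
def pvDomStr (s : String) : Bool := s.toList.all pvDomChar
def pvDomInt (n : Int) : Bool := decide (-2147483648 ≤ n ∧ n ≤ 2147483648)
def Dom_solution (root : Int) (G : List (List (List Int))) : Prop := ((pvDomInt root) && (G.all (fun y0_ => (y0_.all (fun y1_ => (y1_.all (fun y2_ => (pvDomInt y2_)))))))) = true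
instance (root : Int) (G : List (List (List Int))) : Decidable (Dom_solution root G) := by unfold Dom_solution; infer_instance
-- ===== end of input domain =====

-- B replaces the recursive closure-mutating DFS by an iterative two-phase pass: collect the
-- visit order with a worklist, then combine each node from its children in one reverse fold.
-- Ports use PySem.List.pyGetD/pySetD with default 0 / no-op out of range; Pre_solution keeps
-- every index in range, so they are exact there (Python raises outside).

-- ===== PORT A =====
def dfsVisit (G : List (List (List Int))) : Nat → Int → List Int × List Int → List Int × List Int
  | 0, _, st => st   -- fuel exhausted: unreachable under Pre_solution (recursion depth ≤ |G|)
  | fuel+1, r, st =>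
    -- for v,w in G[r]: dfsVisit(v); g[r] += f[v]; f[r] += f[v]; maxi = max(maxi, g[v]-f[v]+w)
    let res := (PySem.List.pyGetD G r []).foldl (fun (p : (List Int × List Int) × Int) e =>
      match e with
      | [v, w] =>
        let st := dfsVisit G fuel v p.1
        let fv := PySem.List.pyGetD st.1 v 0
        let gv := PySem.List.pyGetD st.2 v 0
        let g' := PySem.List.pySetD st.2 r (PySem.List.pyGetD st.2 r 0 + fv)
        let f' := PySem.List.pySetD st.1 r (PySem.List.pyGetD st.1 r 0 + fv)
        ((f', g'), max p.2 (gv - fv + w))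
      | _ => p) (st, 0)   -- a non-pair element makes Python raise ValueError: outside Pre_solution
    -- f[r] += maxi
    (PySem.List.pySetD res.1.1 r (PySem.List.pyGetD res.1.1 r 0 + res.2), res.1.2)

def solution (root : Int) (G : List (List (List Int))) : List Int × List Int :=
  let n := G.length
  let f := List.replicate n (0 : Int)
  let g := List.replicate n (0 : Int)
  dfsVisit G (n + 1) root (f, g)

-- ===== PORT B =====
-- phase 1: Python's growing `order` list with read pointer i, represented as done ++ pending
-- (done = order[:i] already scanned, pending = order[i:]); appends go to the end of pending.
def bfsOrder (G : List (List (List Int))) : Nat → List Int → List Int → List Int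
  | 0, done, pending => done ++ pending   -- fuel exhausted: unreachable under Pre_solution
  | _+1, done, [] => done
  | fuel+1, done, u :: rest =>
    bfsOrder G fuel (done ++ [u])
      (rest ++ (PySem.List.pyGetD G u []).foldl (fun acc e =>
        match e with
        | [v, _] => acc ++ [v]
        | _ => acc) [])

-- phase 2 body: s = Σ f[v]; best = max of g[v]-f[v]+w; g[u] = s; f[u] = s + best
def combineStep (G : List (List (List Int))) (st : List Int × List Int) (u : Int) : List Int × List Int :=
  let p := (PySem.List.pyGetD G u []).foldl (fun (p : Int × Int) e =>
    match e with
    | [v, w] =>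
      (p.1 + PySem.List.pyGetD st.1 v 0,
       max p.2 (PySem.List.pyGetD st.2 v 0 - PySem.List.pyGetD st.1 v 0 + w))
    | _ => p) (0, 0)
  (PySem.List.pySetD st.1 u (p.1 + p.2), PySem.List.pySetD st.2 u p.1)

def solution_alt (root : Int) (G : List (List (List Int))) : List Int × List Int :=
  let n := G.length
  let order := bfsOrder G (n + 1) [] [root]
  order.reverse.foldl (combineStep G) (List.replicate n (0 : Int), List.replicate n (0 : Int))

-- ===== PRECONDITION & SPEC =====
-- ReachSet is plain graph reachability of the INPUT (which nodes the traversal visits at all):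
-- the k-th step adds the stored child targets of the nodes found so far.  It is input shape, not
-- the matching DP (no f/g values are computed).
def childTargets (G : List (List (List Int))) (u : Int) : List Int :=
  (G.getD u.toNat []).filterMap (fun e => match e with | [v, _] => some v | _ => none)

def rstep (G : List (List (List Int))) (s : List Int) : List Int :=
  s ++ ((s.flatMap (childTargets G)).dedup.filter (fun x => x ∉ s))

def reachC (G : List (List (List Int))) (root : Int) : Nat → List Int
  | 0 => [root]
  | k+1 => rstep G (reachC G root k)

def ReachSet (G : List (List (List Int))) (root : Int) : List Int := reachC G root G.length

def nroot (root : Int) (G : List (List (List Int))) : Int :=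
  if root < 0 then root + G.length else root

-- Pre_ restricts to inputs in the tree format this routine is written for, and otherwise
-- excludes exactly the inputs where A raises (out-of-range root or reachable edge target:
-- IndexError; a reachable non-pair edge: ValueError; a cycle, i.e. the root listed as a target:
-- RecursionError) plus two corners: a reachable stored child index that is negative (addressed
-- only through Python's wrap-around, outside the tree format), and non-tree inputs where a
-- reachable node is listed as a child twice — there A walks the shared subtree once per
-- occurrence while B combines each node once, and neither behaviour is specified for a
-- tree-matching routine.  A negative root in [-n, 0) is admitted and normalised by nroot;
-- unreachable nodes are unconstrained.
def Pre_solution (root : Int) (G : List (List (List Int))) : Prop :=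
  -(G.length : Int) ≤ root ∧ root < G.length ∧
  (∀ u ∈ ReachSet G (nroot root G), 0 ≤ u ∧ u < (G.length : Int) ∧
    ∀ e ∈ G.getD u.toNat [], e.length = 2 ∧ 0 ≤ e.headI ∧ e.headI < G.length) ∧
  ((ReachSet G (nroot root G)).flatMap (fun u => (G.getD u.toNat []).map List.headI)).Nodup ∧
  nroot root G ∉ (ReachSet G (nroot root G)).flatMap (fun u => (G.getD u.toNat []).map List.headI)

instance (root : Int) (G : List (List (List Int))) : Decidable (Pre_solution root G) := by
  unfold Pre_solution; infer_instance

def pvWitness_solution : Int × List (List (List Int)) :=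
  (0, [[[1,1],[2,1]],[],[[3,1],[4,5]],[[5,1]],[],[[6,1]],[]])

def Spec_solution (root : Int) (G : List (List (List Int))) (out : List Int × List Int) : Prop := out = solution_alt root G
instance (root : Int) (G : List (List (List Int))) (out : List Int × List Int) : Decidable (Spec_solution root G out) := by unfold Spec_solution; infer_instance

-- ===== CLAIM (what is proved, stated in full; the proofs are below) =====
def Claim_equal_solution : Prop := ∀ (root : Int) (G : List (List (List Int))), Dom_solution root G → Pre_solution root G → Spec_solution root G (solution root G)

-- ===== LEMMAS AND PROOFS =====

-- the precondition specialised to an already-normalised (non-negative) root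
def PreN (root : Int) (G : List (List (List Int))) : Prop :=
  0 ≤ root ∧ root < G.length ∧
  (∀ u ∈ ReachSet G root, 0 ≤ u ∧ u < (G.length : Int) ∧
    ∀ e ∈ G.getD u.toNat [], e.length = 2 ∧ 0 ≤ e.headI ∧ e.headI < G.length) ∧
  ((ReachSet G root).flatMap (fun u => (G.getD u.toNat []).map List.headI)).Nodup ∧
  root ∉ (ReachSet G root).flatMap (fun u => (G.getD u.toNat []).map List.headI)

-- ---------- generic list facts ----------
lemma getD_set_self {l : List Int} {i : Nat} (h : i < l.length) (v : Int) :
    (l.set i v).getD i 0 = v := by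
  simp [List.getD, h]

lemma getD_set_ne {l : List Int} {i j : Nat} (h : i ≠ j) (v : Int) :
    (l.set i v).getD j 0 = l.getD j 0 := by
  simp [List.getD, List.getElem?_set_ne h]

lemma zero_getD (n j : Nat) : (List.replicate n (0 : Int)).getD j 0 = 0 := by
  rcases Nat.lt_or_ge j n with h | h
  · rw [List.getD_eq_getElem _ _ (by simpa using h)]; simp
  · rw [List.getD_eq_default _ _ (by simpa using h)]

lemma foldl_congr_of_mem {α β : Type} {l : List α} {f g : β → α → β} :
    (∀ acc a, a ∈ l → f acc a = g acc a) → ∀ b, l.foldl f b = l.foldl g b := by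
  induction l with
  | nil => intro _ b; rfl
  | cons x xs ih =>
    intro h b
    simp only [List.foldl_cons]
    rw [h b x (by simp)]
    exact ih (fun acc a ha => h acc a (by simp [ha])) _

lemma nodup_flatMap_idx {α β : Type} (f : α → List β) :
    ∀ (l : List α), (l.flatMap f).Nodup →
      ∀ i j (hi : i < l.length) (hj : j < l.length) (x : β),
        x ∈ f l[i] → x ∈ f l[j] → i = j := by
  intro l
  induction l with
  | nil => intro _ i j hi; simp at hi
  | cons a t ih =>
    intro hnd i j hi hj x hxi hxj
    rw [List.flatMap_cons, List.nodup_append] at hnd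
    obtain ⟨h1, h2, hdisj⟩ := hnd
    match i, j with
    | 0, 0 => rfl
    | 0, j+1 =>
      have hj' : j < t.length := by simpa using hj
      have hmem : x ∈ List.flatMap f t :=
        List.mem_flatMap.mpr ⟨t[j], List.getElem_mem _, by simpa using hxj⟩
      exact absurd rfl (hdisj x (by simpa using hxi) x hmem)
    | i+1, 0 =>
      have hi' : i < t.length := by simpa using hi
      have hmem : x ∈ List.flatMap f t :=
        List.mem_flatMap.mpr ⟨t[i], List.getElem_mem _, by simpa using hxi⟩
      exact absurd rfl (hdisj x (by simpa using hxj) x hmem)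
    | i+1, j+1 =>
      have := ih h2 i j (by simpa using hi) (by simpa using hj) x (by simpa using hxi) (by simpa using hxj)
      omega

lemma nodup_flatMap_comp {α β : Type} (f : α → List β) :
    ∀ (l : List α), (l.flatMap f).Nodup → ∀ a ∈ l, (f a).Nodup := by
  intro l
  induction l with
  | nil => intro _ a ha; simp at ha
  | cons b t ih =>
    intro hnd a ha
    rw [List.flatMap_cons, List.nodup_append] at hnd
    rcases List.mem_cons.mp ha with rfl | ha
    · exact hnd.1
    · exact ih hnd.2.1 a ha

lemma nodup_int_bounded {l : List Int} {n : Nat} (hnd : l.Nodup)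
    (hb : ∀ x ∈ l, 0 ≤ x ∧ x < (n : Int)) : l.length ≤ n := by
  classical
  have hmap : (l.map Int.toNat).Nodup := by
    refine List.Nodup.map_on ?_ hnd
    intro x hx y hy hxy
    have := hb x hx; have := hb y hy; omega
  have hsub : (l.map Int.toNat).toFinset ⊆ Finset.range n := by
    intro m hm
    simp only [List.mem_toFinset, List.mem_map] at hm
    obtain ⟨x, hx, rfl⟩ := hm
    have := hb x hx
    simp only [Finset.mem_range]; omega
  have hcard := Finset.card_le_card hsub
  rw [Finset.card_range, List.toFinset_card_of_nodup hmap] at hcard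
  simpa using hcard

lemma nodup_ssubset_length {l1 l2 : List Int} (h1 : l1.Nodup) (h2 : l2.Nodup)
    (hsub : l1 ⊆ l2) {u : Int} (hu2 : u ∈ l2) (hu1 : u ∉ l1) : l1.length < l2.length := by
  classical
  have hins : insert u l1.toFinset ⊆ l2.toFinset := by
    intro x hx
    rcases Finset.mem_insert.mp hx with rfl | hx
    · exact List.mem_toFinset.mpr hu2
    · exact List.mem_toFinset.mpr (hsub (List.mem_toFinset.mp hx))
  have hcard := Finset.card_le_card hins
  rw [Finset.card_insert_of_notMem (by simpa using hu1)] at hcard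
  rw [List.toFinset_card_of_nodup h1, List.toFinset_card_of_nodup h2] at hcard
  omega

lemma concat_split {α : Type} {d1 d2 done : List α} {u' u : α}
    (h : d1 ++ u' :: d2 = done ++ [u]) :
    (d1 = done ∧ u' = u ∧ d2 = []) ∨ (∃ d2', d2 = d2' ++ [u] ∧ done = d1 ++ u' :: d2') := by
  rcases List.eq_nil_or_concat d2 with rfl | ⟨L, b, rfl⟩
  · left
    have h' : d1 ++ [u'] = done ++ [u] := by simpa using h
    have h2 := List.append_inj' h' (by simp)
    have hu : u' = u := by simpa using h2.2
    exact ⟨h2.1, hu, rfl⟩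
  · right
    have h' : (d1 ++ u' :: L) ++ [b] = done ++ [u] := by simpa using h
    have h2 := List.append_inj' h' (by simp)
    have hb : b = u := by simpa using h2.2
    exact ⟨L, by rw [hb]; simp, h2.1.symm⟩

-- ---------- edges and reachability ----------
def EdgeG (G : List (List (List Int))) (x v : Int) : Prop :=
  0 ≤ x ∧ x < G.length ∧ ∃ w, [v, w] ∈ G.getD x.toNat []

inductive ReachG (G : List (List (List Int))) : Int → Int → Prop
  | refl (u : Int) : ReachG G u u
  | step {u y v : Int} : ReachG G u y → EdgeG G y v → ReachG G u v

lemma reach_trans {G : List (List (List Int))} {u y x : Int}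
    (h1 : ReachG G u y) (h2 : ReachG G y x) : ReachG G u x := by
  induction h2 with
  | refl => exact h1
  | step hr he ih => exact ReachG.step ih he

lemma edge_reach {G : List (List (List Int))} {u v : Int} (h : EdgeG G u v) : ReachG G u v :=
  ReachG.step (ReachG.refl u) h

lemma reach_head {G : List (List (List Int))} {u x : Int} (h : ReachG G u x) :
    x = u ∨ ∃ v, EdgeG G u v ∧ ReachG G v x := by
  induction h with
  | refl => left; rfl
  | step hr he ih =>
    rcases ih with rfl | ⟨c, hc, hcy⟩
    · right; exact ⟨_, he, ReachG.refl _⟩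
    · right; exact ⟨c, hc, ReachG.step hcy he⟩

lemma reach_tail {G : List (List (List Int))} {u x : Int} (h : ReachG G u x) :
    x = u ∨ ∃ y, ReachG G u y ∧ EdgeG G y x := by
  cases h with
  | refl => left; rfl
  | step hr he => right; exact ⟨_, hr, he⟩

-- membership in the reachable-set closure
lemma mem_rstep {G : List (List (List Int))} {s : List Int} {x : Int} :
    x ∈ rstep G s ↔ x ∈ s ∨ ∃ u ∈ s, x ∈ childTargets G u := by
  simp only [rstep, List.mem_append, List.mem_filter, List.mem_dedup, List.mem_flatMap,
    decide_not, Bool.not_eq_eq_eq_not, Bool.not_true, decide_eq_false_iff_not]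
  by_cases hx : x ∈ s <;> simp [hx]

lemma reachC_mono_succ {G : List (List (List Int))} {root : Int} (k : Nat) :
    reachC G root k ⊆ reachC G root (k+1) := by
  intro x hx
  show x ∈ rstep G (reachC G root k)
  exact mem_rstep.mpr (Or.inl hx)

lemma reachC_mono {G : List (List (List Int))} {root : Int} {k k' : Nat} (h : k ≤ k') :
    reachC G root k ⊆ reachC G root k' := by
  induction k' with
  | zero => have : k = 0 := by omega
            subst this; exact fun x hx => hx
  | succ k' ih =>
    rcases Nat.lt_or_ge k (k'+1) with h' | h'
    · exact fun x hx => reachC_mono_succ k' (ih (by omega) hx)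
    · have : k = k' + 1 := by omega
      subst this; exact fun x hx => hx

lemma root_mem_reachC {G : List (List (List Int))} {root : Int} (k : Nat) :
    root ∈ reachC G root k := reachC_mono (Nat.zero_le k) (by simp [reachC])

lemma edge_childTargets {G : List (List (List Int))} {u x : Int} (w : Int)
    (h : [x, w] ∈ G.getD u.toNat []) : x ∈ childTargets G u := by
  simp only [childTargets, List.mem_filterMap]
  exact ⟨[x, w], h, rfl⟩

lemma childTargets_edge {G : List (List (List Int))} {u x : Int} (h0 : 0 ≤ u)
    (hn : u < (G.length : Int)) (hsh : ∀ e ∈ G.getD u.toNat [], e.length = 2)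
    (hx : x ∈ childTargets G u) : EdgeG G u x := by
  simp only [childTargets, List.mem_filterMap] at hx
  obtain ⟨e, he, hm⟩ := hx
  match e, hsh e he with
  | [v, w], _ =>
    have hv : v = x := by simpa using hm
    exact ⟨h0, hn, w, hv ▸ he⟩

-- ---------- the closure stabilises and is closed under child edges ----------
lemma rstep_nodup {G : List (List (List Int))} {s : List Int} (h : s.Nodup) :
    (rstep G s).Nodup := by
  unfold rstep
  rw [List.nodup_append]
  refine ⟨h, List.Nodup.filter _ (List.nodup_dedup _), ?_⟩
  intro a ha b hb hab
  subst hab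
  have := (List.mem_filter.mp hb).2
  simp only [decide_not, Bool.not_eq_eq_eq_not, Bool.not_true, decide_eq_false_iff_not] at this
  exact this ha

lemma reachC_nodup {G : List (List (List Int))} {root : Int} (k : Nat) :
    (reachC G root k).Nodup := by
  induction k with
  | zero => simp [reachC]
  | succ k ih => exact rstep_nodup ih

lemma stable_forever {G : List (List (List Int))} {root : Int} {k : Nat}
    (h : reachC G root (k+1) = reachC G root k) :
    ∀ j, reachC G root (k + j) = reachC G root k := by
  intro j
  induction j with
  | zero => rfl
  | succ j ih =>
    have : reachC G root (k + (j+1)) = rstep G (reachC G root (k + j)) := rfl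
    rw [this, ih]
    exact h

lemma reachC_grow {G : List (List (List Int))} {root : Int} :
    ∀ k, (∀ j < k, reachC G root (j+1) ≠ reachC G root j) →
      k < (reachC G root k).length := by
  intro k
  induction k with
  | zero => intro _; simp [reachC]
  | succ k ih =>
    intro h
    have hk := ih (fun j hj => h j (by omega))
    have hne := h k (by omega)
    have hform : reachC G root (k+1) = reachC G root k ++
        (((reachC G root k).flatMap (childTargets G)).dedup.filter
          (fun x => x ∉ reachC G root k)) := rfl
    set t := ((reachC G root k).flatMap (childTargets G)).dedup.filter
      (fun x => x ∉ reachC G root k) with ht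
    have htne : t ≠ [] := by
      intro h0
      apply hne
      rw [hform, h0, List.append_nil]
    have : 0 < t.length := List.length_pos_of_ne_nil htne
    rw [hform, List.length_append]
    omega

lemma closure_closed {G : List (List (List Int))} {s : Int}
    (hb : ∀ x ∈ reachC G s G.length, 0 ≤ x ∧ x < (G.length : Int)) :
    rstep G (reachC G s G.length) = reachC G s G.length := by
  classical
  by_cases hall : ∀ j < G.length, reachC G s (j+1) ≠ reachC G s j
  · exfalso
    have hgrow := reachC_grow G.length hall
    have hle := nodup_int_bounded (reachC_nodup G.length) hb
    omega
  · push Not at hall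
    obtain ⟨j, hj, heq⟩ := hall
    have h1 : reachC G s G.length = reachC G s j := by
      have := stable_forever heq (G.length - j)
      have hh : j + (G.length - j) = G.length := by omega
      rwa [hh] at this
    have h2 : rstep G (reachC G s G.length) = reachC G s (G.length + 1) := rfl
    rw [h2]
    have h3 : reachC G s (G.length + 1) = reachC G s j := by
      have := stable_forever heq (G.length + 1 - j)
      have hh : j + (G.length + 1 - j) = G.length + 1 := by omega
      rwa [hh] at this
    rw [h3, h1]

lemma mem_closed {G : List (List (List Int))} {s u x : Int}
    (hb : ∀ y ∈ reachC G s G.length, 0 ≤ y ∧ y < (G.length : Int))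
    (hu : u ∈ reachC G s G.length) (hx : x ∈ childTargets G u) :
    x ∈ reachC G s G.length := by
  rw [← closure_closed hb]
  exact mem_rstep.mpr (Or.inr ⟨u, hu, hx⟩)

-- ---------- soundness and completeness of ReachSet ----------
lemma reach_mem {G : List (List (List Int))} {root x : Int} (hwf : PreN root G)
    (h : ReachG G root x) : x ∈ ReachSet G root ∧ 0 ≤ x ∧ x < (G.length : Int) := by
  have hb : ∀ y ∈ reachC G root G.length, 0 ≤ y ∧ y < (G.length : Int) := by
    intro y hy
    have := hwf.2.2.1 y hy
    exact ⟨this.1, this.2.1⟩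
  have hmem : x ∈ ReachSet G root := by
    induction h with
    | refl => exact root_mem_reachC _
    | step hr he ih =>
      obtain ⟨_, _, w, hw⟩ := he
      exact mem_closed hb ih (edge_childTargets w hw)
  exact ⟨hmem, (hwf.2.2.1 x hmem).1, (hwf.2.2.1 x hmem).2.1⟩

lemma wf_shape {G : List (List (List Int))} {root u : Int} (hwf : PreN root G)
    (hru : ReachG G root u) {e : List Int} (he : e ∈ G.getD u.toNat []) :
    ∃ v w, e = [v, w] ∧ 0 ≤ v ∧ v < (G.length : Int) ∧ EdgeG G u v := by
  obtain ⟨hmem, hu0, hun⟩ := reach_mem hwf hru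
  obtain ⟨_, _, hsh⟩ := hwf.2.2.1 u hmem
  have hs := hsh e he
  obtain ⟨hlen, h0, hub⟩ := hs
  match e, hlen with
  | [v, w], _ =>
    simp only [List.headI] at h0 hub
    exact ⟨v, w, rfl, h0, hub, ⟨hu0, hun, w, he⟩⟩

lemma edge_bounds {G : List (List (List Int))} {root x v : Int} (hwf : PreN root G)
    (hrx : ReachG G root x) (h : EdgeG G x v) : 0 ≤ v ∧ v < (G.length : Int) :=
  (reach_mem hwf (ReachG.step hrx h)).2

-- the per-node reachable set: sound, complete and bounded for any root-reachable start
lemma sound_u {G : List (List (List Int))} {root u : Int} (hwf : PreN root G)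
    (hru : ReachG G root u) : ∀ k, ∀ x ∈ reachC G u k, ReachG G u x := by
  intro k
  induction k with
  | zero =>
    intro x hx
    have : x = u := by simpa [reachC] using hx
    rw [this]; exact ReachG.refl u
  | succ k ih =>
    intro x hx
    rcases mem_rstep.mp hx with hx | ⟨y, hy, hx⟩
    · exact ih x hx
    · have huy : ReachG G u y := ih y hy
      have hry : ReachG G root y := reach_trans hru huy
      obtain ⟨hym, _, _⟩ := reach_mem hwf hry
      obtain ⟨h0, hn, hsh⟩ := hwf.2.2.1 y hym
      exact ReachG.step huy (childTargets_edge h0 hn (fun e he => (hsh e he).1) hx)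

lemma hb_u {G : List (List (List Int))} {root u : Int} (hwf : PreN root G)
    (hru : ReachG G root u) :
    ∀ x ∈ reachC G u G.length, 0 ≤ x ∧ x < (G.length : Int) := by
  intro x hx
  exact (reach_mem hwf (reach_trans hru (sound_u hwf hru _ x hx))).2

lemma complete_u {G : List (List (List Int))} {root u x : Int} (hwf : PreN root G)
    (hru : ReachG G root u) (h : ReachG G u x) : x ∈ ReachSet G u := by
  induction h with
  | refl => exact root_mem_reachC _
  | step hr he ih =>
    obtain ⟨_, _, w, hw⟩ := he
    exact mem_closed (hb_u hwf hru) ih (edge_childTargets w hw)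

-- ---------- acyclicity from the unique-incoming-edge and root-not-a-target conditions ----------
lemma unique_incoming {G : List (List (List Int))} {root a b v : Int} (hwf : PreN root G)
    (hra : ReachG G root a) (hrb : ReachG G root b)
    (ha : EdgeG G a v) (hb : EdgeG G b v) : a = b := by
  obtain ⟨hma, _, _⟩ := reach_mem hwf hra
  obtain ⟨hmb, _, _⟩ := reach_mem hwf hrb
  obtain ⟨i, hi, hieq⟩ := List.mem_iff_getElem.mp hma
  obtain ⟨j, hj, hjeq⟩ := List.mem_iff_getElem.mp hmb
  obtain ⟨_, _, wa, hmemA⟩ := ha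
  obtain ⟨_, _, wb, hmemB⟩ := hb
  have h1 : v ∈ (fun u => (G.getD u.toNat []).map List.headI) (ReachSet G root)[i] := by
    rw [hieq]; exact List.mem_map.mpr ⟨[v, wa], hmemA, rfl⟩
  have h2 : v ∈ (fun u => (G.getD u.toNat []).map List.headI) (ReachSet G root)[j] := by
    rw [hjeq]; exact List.mem_map.mpr ⟨[v, wb], hmemB, rfl⟩
  have hij := nodup_flatMap_idx _ (ReachSet G root) hwf.2.2.2.1 i j hi hj v h1 h2
  subst hij
  rw [← hieq, ← hjeq]

lemma target_mem_flat {G : List (List (List Int))} {root u c : Int} (hwf : PreN root G)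
    (hru : ReachG G root u) (hec : EdgeG G u c) :
    c ∈ (ReachSet G root).flatMap (fun u => (G.getD u.toNat []).map List.headI) := by
  obtain ⟨hm, _, _⟩ := reach_mem hwf hru
  obtain ⟨_, _, w, hw⟩ := hec
  exact List.mem_flatMap.mpr ⟨u, hm, List.mem_map.mpr ⟨[c, w], hw, rfl⟩⟩

lemma root_no_in {G : List (List (List Int))} {root u : Int} (hwf : PreN root G)
    (hru : ReachG G root u) (hec : EdgeG G u root) : False :=
  hwf.2.2.2.2 (target_mem_flat hwf hru hec)

lemma no_cycle {G : List (List (List Int))} {root : Int} (hwf : PreN root G) :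
    ∀ {v : Int}, ReachG G root v → ∀ c, EdgeG G v c → ¬ ReachG G c v := by
  intro v hrv
  induction hrv with
  | refl =>
    intro c hec hcr
    rcases reach_tail hcr with h | ⟨y, hcy, hey⟩
    · rw [← h] at hec
      exact root_no_in hwf (ReachG.refl root) hec
    · exact root_no_in hwf (reach_trans (edge_reach hec) hcy) hey
  | step hr he ih =>
    rename_i p v'
    intro c hec hcv
    have hrv' : ReachG G root v' := ReachG.step hr he
    rcases reach_tail hcv with h | ⟨y, hcy, hey⟩
    · subst h
      have hpv : p = v' := unique_incoming hwf hr hrv' he hec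
      exact ih v' he (by rw [← hpv]; exact ReachG.refl p)
    · have hrc : ReachG G root c := ReachG.step hrv' hec
      have hry : ReachG G root y := reach_trans hrc hcy
      have hyp : y = p := unique_incoming hwf hry hr hey he
      exact ih v' he (reach_trans (edge_reach hec) (hyp ▸ hcy))

lemma reach_disjoint {G : List (List (List Int))} {root u a b : Int} (hwf : PreN root G)
    (hru : ReachG G root u) (ha : EdgeG G u a) (hb : EdgeG G u b) (hab : a ≠ b) :
    ∀ x, ReachG G a x → ReachG G b x → False := by
  have hra : ReachG G root a := ReachG.step hru ha
  have hrb : ReachG G root b := ReachG.step hru hb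
  intro x hax
  induction hax with
  | refl =>
    intro hbx
    rcases reach_tail hbx with h | ⟨y, hby, hey⟩
    · exact hab h
    · have hry : ReachG G root y := reach_trans hrb hby
      have hyu : y = u := unique_incoming hwf hry hru hey ha
      exact no_cycle hwf hru b hb (hyu ▸ hby)
  | step hay hey ih =>
    rename_i y x'
    intro hbx
    rcases reach_tail hbx with h | ⟨z, hbz, hez⟩
    · subst h
      have hry : ReachG G root y := reach_trans hra hay
      have hyu : y = u := unique_incoming hwf hry hru hey hb
      exact no_cycle hwf hru a ha (hyu ▸ hay)
    · have hry : ReachG G root y := reach_trans hra hay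
      have hrz : ReachG G root z := reach_trans hrb hbz
      have hzy : z = y := unique_incoming hwf hrz hry hez hey
      exact ih (hzy ▸ hbz)

-- ---------- the recursion-depth measure: size of the reachable set ----------
def Suff (G : List (List (List Int))) (fuel : Nat) (u : Int) : Prop :=
  (ReachSet G u).length ≤ fuel

lemma suff_zero_false {G : List (List (List Int))} {u : Int} (hs : Suff G 0 u) : False := by
  unfold Suff at hs
  have hmem : u ∈ ReachSet G u := root_mem_reachC _
  have : ReachSet G u ≠ [] := List.ne_nil_of_mem hmem
  cases h : ReachSet G u with
  | nil => exact this h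
  | cons a t => rw [h] at hs; simp at hs

lemma suff_child {G : List (List (List Int))} {root u c : Int} (hwf : PreN root G)
    (hru : ReachG G root u) (hec : EdgeG G u c) {fuel : Nat}
    (hs : Suff G (fuel + 1) u) : Suff G fuel c := by
  have hrc : ReachG G root c := ReachG.step hru hec
  have hsub : ReachSet G c ⊆ ReachSet G u := by
    intro x hx
    exact complete_u hwf hru (reach_trans (edge_reach hec) (sound_u hwf hrc _ x hx))
  have hu2 : u ∈ ReachSet G u := root_mem_reachC _
  have hu1 : u ∉ ReachSet G c := by
    intro h
    exact no_cycle hwf hru c hec (sound_u hwf hrc _ u h)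
  unfold Suff at hs ⊢
  have hlt : (ReachSet G c).length < (ReachSet G u).length :=
    nodup_ssubset_length (reachC_nodup _) (reachC_nodup _) hsub hu2 hu1
  omega

lemma suff_top {G : List (List (List Int))} {root u : Int} (hwf : PreN root G)
    (hru : ReachG G root u) : Suff G (G.length + 1) u := by
  unfold Suff
  have hle : (ReachSet G u).length ≤ G.length :=
    nodup_int_bounded (reachC_nodup (G := G) (root := u) G.length) (hb_u hwf hru)
  omega

-- ---------- pure per-node values ----------
def pureFG (G : List (List (List Int))) : Nat → Int → Int × Int
  | 0, _ => (0, 0)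
  | fuel+1, u =>
    let p := (G.getD u.toNat []).foldl (fun (p : Int × Int) e =>
      match e with
      | [v, w] => (p.1 + (pureFG G fuel v).1, max p.2 ((pureFG G fuel v).2 - (pureFG G fuel v).1 + w))
      | _ => p) (0, 0)
    (p.1 + p.2, p.1)

def PFv (G : List (List (List Int))) (u : Int) : Int × Int := pureFG G (G.length + 1) u

def pacc (G : List (List (List Int))) (cs : List (List Int)) : Int × Int :=
  cs.foldl (fun p e => match e with
    | [v, w] => (p.1 + (PFv G v).1, max p.2 ((PFv G v).2 - (PFv G v).1 + w))
    | _ => p) (0, 0)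

lemma pure_irrel {G : List (List (List Int))} {root : Int} (hwf : PreN root G) :
    ∀ fuel fuel' (u : Int), ReachG G root u → Suff G fuel u → Suff G fuel' u →
      pureFG G fuel u = pureFG G fuel' u := by
  intro fuel
  induction fuel with
  | zero =>
    intro fuel' u hru hs
    exact absurd hs (fun h => suff_zero_false h)
  | succ fuel ih =>
    intro fuel' u hru hs hs'
    cases fuel' with
    | zero => exact absurd hs' (fun h => suff_zero_false h)
    | succ fuel' =>
      have hfold : List.foldl (fun (p : Int × Int) e =>
          match e with
          | [v, w] => (p.1 + (pureFG G fuel v).1, max p.2 ((pureFG G fuel v).2 - (pureFG G fuel v).1 + w))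
          | _ => p) (0, 0) (G.getD u.toNat []) =
        List.foldl (fun (p : Int × Int) e =>
          match e with
          | [v, w] => (p.1 + (pureFG G fuel' v).1, max p.2 ((pureFG G fuel' v).2 - (pureFG G fuel' v).1 + w))
          | _ => p) (0, 0) (G.getD u.toNat []) := by
        apply foldl_congr_of_mem
        intro acc e he
        obtain ⟨v, w, rfl, hv0, hvn, hedge⟩ := wf_shape hwf hru he
        have h1 : Suff G fuel v := suff_child hwf hru hedge hs
        have h2 : Suff G fuel' v := suff_child hwf hru hedge hs'
        show (acc.1 + (pureFG G fuel v).1, max acc.2 ((pureFG G fuel v).2 - (pureFG G fuel v).1 + w)) =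
             (acc.1 + (pureFG G fuel' v).1, max acc.2 ((pureFG G fuel' v).2 - (pureFG G fuel' v).1 + w))
        rw [ih fuel' v (ReachG.step hru hedge) h1 h2]
      simp only [pureFG]
      rw [hfold]

lemma pure_eq_PF {G : List (List (List Int))} {root : Int} {fuel : Nat} {u : Int}
    (hwf : PreN root G) (hru : ReachG G root u) (hs : Suff G fuel u) :
    pureFG G fuel u = PFv G u :=
  pure_irrel hwf fuel (G.length + 1) u hru hs (suff_top hwf hru)

lemma PF_unfold {G : List (List (List Int))} {root u : Int} (hwf : PreN root G)
    (hru : ReachG G root u) :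
    PFv G u = ((pacc G (G.getD u.toNat [])).1 + (pacc G (G.getD u.toNat [])).2,
               (pacc G (G.getD u.toNat [])).1) := by
  have hfold : List.foldl (fun (p : Int × Int) e =>
      match e with
      | [v, w] => (p.1 + (pureFG G G.length v).1, max p.2 ((pureFG G G.length v).2 - (pureFG G G.length v).1 + w))
      | _ => p) (0, 0) (G.getD u.toNat []) = pacc G (G.getD u.toNat []) := by
    unfold pacc
    apply foldl_congr_of_mem
    intro acc e he
    obtain ⟨v, w, rfl, hv0, hvn, hedge⟩ := wf_shape hwf hru he
    show (acc.1 + (pureFG G G.length v).1, max acc.2 ((pureFG G G.length v).2 - (pureFG G G.length v).1 + w)) =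
         (acc.1 + (PFv G v).1, max acc.2 ((PFv G v).2 - (PFv G v).1 + w))
    rw [pure_eq_PF hwf (ReachG.step hru hedge) (suff_child hwf hru hedge (suff_top hwf hru))]
  show pureFG G (G.length + 1) u = _
  simp only [pureFG]
  rw [hfold]

lemma pyGetD_nonneg_getD {α : Type} {l : List α} {i : Int} {d : α} (h : 0 ≤ i) :
    PySem.List.pyGetD l i d = l.getD i.toNat d := by
  have h2 : i = ((i.toNat : Nat) : Int) := by omega
  rw [h2, PySem.List.pyGetD_natCast]; congr 1

-- ---------- A-side main lemma ----------
def dfsStep (G : List (List (List Int))) (fuel : Nat) (v : Int)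
    (p : (List Int × List Int) × Int) (e : List Int) : (List Int × List Int) × Int :=
  match e with
  | [c, w] =>
    ((PySem.List.pySetD (dfsVisit G fuel c p.1).1 v
        (PySem.List.pyGetD (dfsVisit G fuel c p.1).1 v 0 + PySem.List.pyGetD (dfsVisit G fuel c p.1).1 c 0),
      PySem.List.pySetD (dfsVisit G fuel c p.1).2 v
        (PySem.List.pyGetD (dfsVisit G fuel c p.1).2 v 0 + PySem.List.pyGetD (dfsVisit G fuel c p.1).1 c 0)),
     max p.2 (PySem.List.pyGetD (dfsVisit G fuel c p.1).2 c 0 - PySem.List.pyGetD (dfsVisit G fuel c p.1).1 c 0 + w))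
  | _ => p

lemma dfsVisit_succ (G : List (List (List Int))) (fuel : Nat) (v : Int) (st : List Int × List Int) :
    dfsVisit G (fuel+1) v st =
      (PySem.List.pySetD ((PySem.List.pyGetD G v []).foldl (dfsStep G fuel v) (st, 0)).1.1 v
         (PySem.List.pyGetD ((PySem.List.pyGetD G v []).foldl (dfsStep G fuel v) (st, 0)).1.1 v 0 +
          ((PySem.List.pyGetD G v []).foldl (dfsStep G fuel v) (st, 0)).2),
       ((PySem.List.pyGetD G v []).foldl (dfsStep G fuel v) (st, 0)).1.2) := by
  have hstep : ∀ (p : (List Int × List Int) × Int), ∀ e ∈ (PySem.List.pyGetD G v []),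
      (fun (p : (List Int × List Int) × Int) e =>
        match e with
        | [c, w] =>
          ((PySem.List.pySetD (dfsVisit G fuel c p.1).1 v
              (PySem.List.pyGetD (dfsVisit G fuel c p.1).1 v 0 + PySem.List.pyGetD (dfsVisit G fuel c p.1).1 c 0),
            PySem.List.pySetD (dfsVisit G fuel c p.1).2 v
              (PySem.List.pyGetD (dfsVisit G fuel c p.1).2 v 0 + PySem.List.pyGetD (dfsVisit G fuel c p.1).1 c 0)),
           max p.2 (PySem.List.pyGetD (dfsVisit G fuel c p.1).2 c 0 - PySem.List.pyGetD (dfsVisit G fuel c p.1).1 c 0 + w))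
        | _ => p) p e = dfsStep G fuel v p e := by
    intro p e _
    match e with
    | [] => rfl
    | [a] => rfl
    | [a, b] => rfl
    | a :: b :: c :: t => rfl
  simp only [dfsVisit]
  rw [foldl_congr_of_mem hstep]

lemma pacc_append (G : List (List (List Int))) (cs : List (List Int)) (c w : Int) :
    pacc G (cs ++ [[c, w]]) =
      ((pacc G cs).1 + (PFv G c).1, max (pacc G cs).2 ((PFv G c).2 - (PFv G c).1 + w)) := by
  simp [pacc, List.foldl_append]

lemma dfs_main {G : List (List (List Int))} {root : Int} (hwf : PreN root G) :
    ∀ fuel (v : Int) (st : List Int × List Int),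
      ReachG G root v → Suff G fuel v →
      st.1.length = G.length → st.2.length = G.length →
      (∀ x : Int, ReachG G v x → st.1.getD x.toNat 0 = 0 ∧ st.2.getD x.toNat 0 = 0) →
      (dfsVisit G fuel v st).1.length = G.length ∧
      (dfsVisit G fuel v st).2.length = G.length ∧
      (∀ x : Int, ReachG G v x →
          (dfsVisit G fuel v st).1.getD x.toNat 0 = (PFv G x).1 ∧
          (dfsVisit G fuel v st).2.getD x.toNat 0 = (PFv G x).2) ∧
      (∀ x : Int, 0 ≤ x → ¬ ReachG G v x →
          (dfsVisit G fuel v st).1.getD x.toNat 0 = st.1.getD x.toNat 0 ∧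
          (dfsVisit G fuel v st).2.getD x.toNat 0 = st.2.getD x.toNat 0) := by
  intro fuel
  induction fuel with
  | zero =>
    intro v st hrv hs
    exact absurd hs (fun h => suff_zero_false h)
  | succ fuel ih =>
    intro v st hrv hs hl1 hl2 hz
    have hbm := reach_mem hwf hrv
    have h0 : (0:Int) ≤ v := hbm.2.1
    have hn : v < (G.length : Int) := hbm.2.2
    have hvu : v.toNat < G.length := by omega
    have hbridge : PySem.List.pyGetD G v [] = G.getD v.toNat [] := pyGetD_nonneg_getD h0
    have inner : ∀ (todo done : List (List Int)),
        G.getD v.toNat [] = done ++ todo →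
        ∀ (stp : List Int × List Int) (m : Int),
        stp.1.length = G.length → stp.2.length = G.length →
        stp.1.getD v.toNat 0 = (pacc G done).1 →
        stp.2.getD v.toNat 0 = (pacc G done).1 →
        m = (pacc G done).2 →
        (∀ x : Int, x ≠ v → (∃ e ∈ done, ReachG G e.headI x) →
            stp.1.getD x.toNat 0 = (PFv G x).1 ∧ stp.2.getD x.toNat 0 = (PFv G x).2) →
        (∀ x : Int, 0 ≤ x → x ≠ v → (∀ e ∈ done, ¬ ReachG G e.headI x) →
            stp.1.getD x.toNat 0 = st.1.getD x.toNat 0 ∧ stp.2.getD x.toNat 0 = st.2.getD x.toNat 0) →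
        (todo.foldl (dfsStep G fuel v) (stp, m)).1.1.length = G.length ∧
        (todo.foldl (dfsStep G fuel v) (stp, m)).1.2.length = G.length ∧
        (todo.foldl (dfsStep G fuel v) (stp, m)).1.1.getD v.toNat 0 = (pacc G (G.getD v.toNat [])).1 ∧
        (todo.foldl (dfsStep G fuel v) (stp, m)).1.2.getD v.toNat 0 = (pacc G (G.getD v.toNat [])).1 ∧
        (todo.foldl (dfsStep G fuel v) (stp, m)).2 = (pacc G (G.getD v.toNat [])).2 ∧
        (∀ x : Int, x ≠ v → (∃ e ∈ G.getD v.toNat [], ReachG G e.headI x) →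
            (todo.foldl (dfsStep G fuel v) (stp, m)).1.1.getD x.toNat 0 = (PFv G x).1 ∧
            (todo.foldl (dfsStep G fuel v) (stp, m)).1.2.getD x.toNat 0 = (PFv G x).2) ∧
        (∀ x : Int, 0 ≤ x → x ≠ v → (∀ e ∈ G.getD v.toNat [], ¬ ReachG G e.headI x) →
            (todo.foldl (dfsStep G fuel v) (stp, m)).1.1.getD x.toNat 0 = st.1.getD x.toNat 0 ∧
            (todo.foldl (dfsStep G fuel v) (stp, m)).1.2.getD x.toNat 0 = st.2.getD x.toNat 0) := by
      intro todo
      induction todo with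
      | nil =>
        intro done hes stp m hL1 hL2 hv1 hv2 hm hfin hunt
        have hdone : done = G.getD v.toNat [] := by simpa using hes.symm
        rw [hdone] at hv1 hv2 hm hfin hunt
        exact ⟨hL1, hL2, hv1, hv2, hm, hfin, hunt⟩
      | cons e todo' ihin =>
        intro done hes stp m hL1 hL2 hv1 hv2 hm hfin hunt
        have hemem : e ∈ G.getD v.toNat [] := by rw [hes]; simp
        obtain ⟨c, w, rfl, hc0, hcn, hedge⟩ := wf_shape hwf hrv hemem
        have hrc : ReachG G root c := ReachG.step hrv hedge
        -- c is not the head of an already-processed edge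
        have hcnotdone : ∀ e' ∈ done, e'.headI ≠ c := by
          have hnd : ((G.getD v.toNat []).map List.headI).Nodup :=
            nodup_flatMap_comp _ (ReachSet G root) hwf.2.2.2.1 _ hbm.1
          rw [hes] at hnd
          simp only [List.map_append, List.map_cons, List.headI] at hnd
          have hdsj := (List.nodup_append.mp hnd).2.2
          intro e' he' heq
          exact hdsj e'.headI (List.mem_map_of_mem he') c (by simp) heq
        -- subtrees of processed edges are disjoint from the subtree of c
        have hdisjj : ∀ e' ∈ done, ∀ x, ReachG G e'.headI x → ReachG G c x → False := by
          intro e' he' x hx1 hx2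
          have he'mem : e' ∈ G.getD v.toNat [] := by rw [hes]; simp [he']
          obtain ⟨c', w', he'eq, hc'0, hc'n, hedge'⟩ := wf_shape hwf hrv he'mem
          have hne : c' ≠ c := by
            have := hcnotdone e' he'
            rw [he'eq] at this; simpa [List.headI] using this
          rw [he'eq] at hx1
          simp only [List.headI] at hx1
          exact reach_disjoint hwf hrv hedge' hedge hne x hx1 hx2
        -- the subtree of c is still all-zero
        have hzc : ∀ x, ReachG G c x → stp.1.getD x.toNat 0 = 0 ∧ stp.2.getD x.toNat 0 = 0 := by
          intro x hx
          have hx0 : 0 ≤ x := (reach_mem hwf (reach_trans hrc hx)).2.1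
          have hxv : x ≠ v := fun h => no_cycle hwf hrv c hedge (h ▸ hx)
          have hno : ∀ e' ∈ done, ¬ ReachG G e'.headI x := fun e' he' hr => hdisjj e' he' x hr hx
          have h1 := hunt x hx0 hxv hno
          have h2 := hz x (reach_trans (edge_reach hedge) hx)
          rw [h1.1, h1.2]; exact h2
        have hSc : Suff G fuel c := suff_child hwf hrv hedge hs
        obtain ⟨hsl1, hsl2, hval, hframe⟩ := ih c stp hrc hSc hL1 hL2 hzc
        have hfv : (dfsVisit G fuel c stp).1.getD c.toNat 0 = (PFv G c).1 :=
          (hval c (ReachG.refl c)).1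
        have hgv : (dfsVisit G fuel c stp).2.getD c.toNat 0 = (PFv G c).2 :=
          (hval c (ReachG.refl c)).2
        have hncv : ¬ ReachG G c v := no_cycle hwf hrv c hedge
        have hrv1 : (dfsVisit G fuel c stp).1.getD v.toNat 0 = (pacc G done).1 := by
          rw [(hframe v h0 hncv).1, hv1]
        have hrv2 : (dfsVisit G fuel c stp).2.getD v.toNat 0 = (pacc G done).1 := by
          rw [(hframe v h0 hncv).2, hv2]
        have haccum : dfsStep G fuel v (stp, m) [c, w] =
            (((dfsVisit G fuel c stp).1.set v.toNat ((pacc G done).1 + (PFv G c).1),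
              (dfsVisit G fuel c stp).2.set v.toNat ((pacc G done).1 + (PFv G c).1)),
             max m ((PFv G c).2 - (PFv G c).1 + w)) := by
          show ((PySem.List.pySetD (dfsVisit G fuel c stp).1 v
                  (PySem.List.pyGetD (dfsVisit G fuel c stp).1 v 0 + PySem.List.pyGetD (dfsVisit G fuel c stp).1 c 0),
                PySem.List.pySetD (dfsVisit G fuel c stp).2 v
                  (PySem.List.pyGetD (dfsVisit G fuel c stp).2 v 0 + PySem.List.pyGetD (dfsVisit G fuel c stp).1 c 0)),
               max m (PySem.List.pyGetD (dfsVisit G fuel c stp).2 c 0 - PySem.List.pyGetD (dfsVisit G fuel c stp).1 c 0 + w)) = _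
          simp only [pyGetD_nonneg_getD hc0, pyGetD_nonneg_getD h0,
            PySem.List.pySetD_of_nonneg _ _ h0, hfv, hgv, hrv1, hrv2]
        simp only [List.foldl_cons, haccum]
        -- apply the inner induction hypothesis with the extended processed list
        apply ihin (done ++ [[c, w]]) (by rw [hes]; simp)
        · simpa using hsl1
        · simpa using hsl2
        · dsimp only; rw [getD_set_self (by omega) _, pacc_append]
        · dsimp only; rw [getD_set_self (by omega) _, pacc_append]
        · dsimp only; rw [hm, pacc_append]
        · -- finished subtrees
          intro x hxv ⟨e', he', hrx⟩
          dsimp only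
          rcases List.mem_append.mp he' with he' | he'
          · -- an older subtree: untouched by the recursive call and the writes at v
            have he'mem : e' ∈ G.getD v.toNat [] := by rw [hes]; simp [he']
            obtain ⟨c', w', he'eq, hc'0, hc'n, hedge'⟩ := wf_shape hwf hrv he'mem
            rw [he'eq] at hrx
            simp only [List.headI] at hrx
            have hx0 : 0 ≤ x :=
              (reach_mem hwf (reach_trans (ReachG.step hrv hedge') hrx)).2.1
            have hnr : ¬ ReachG G c x := by
              intro h
              exact hdisjj e' he' x (by rw [he'eq]; simpa [List.headI] using hrx) h
            have hfr := hframe x hx0 hnr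
            have hxvi : x ≠ v := fun hh => no_cycle hwf hrv c' hedge' (hh ▸ hrx)
            have hne : x.toNat ≠ v.toNat := by omega
            rw [getD_set_ne (Ne.symm hne) _, getD_set_ne (Ne.symm hne) _, hfr.1, hfr.2]
            exact hfin x hxv ⟨e', he', by rw [he'eq]; simpa [List.headI] using hrx⟩
          · -- the subtree just finished
            have he'c : e' = [c, w] := by simpa using he'
            rw [he'c] at hrx; simp only [List.headI] at hrx
            have hxvi : x ≠ v := fun hh => no_cycle hwf hrv c hedge (hh ▸ hrx)
            have hx0 : 0 ≤ x := (reach_mem hwf (reach_trans hrc hrx)).2.1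
            have hne : x.toNat ≠ v.toNat := by omega
            rw [getD_set_ne (Ne.symm hne) _, getD_set_ne (Ne.symm hne) _]
            exact hval x hrx
        · -- untouched positions
          intro x hx0 hxv hno
          dsimp only
          have hnr : ¬ ReachG G c x := by
            have := hno [c, w] (by simp)
            simpa [List.headI] using this
          have hfr := hframe x hx0 hnr
          have hne : x.toNat ≠ v.toNat := by omega
          rw [getD_set_ne (Ne.symm hne) _, getD_set_ne (Ne.symm hne) _, hfr.1, hfr.2]
          exact hunt x hx0 hxv (fun e' he' => hno e' (by simp [he']))
    -- assemble the one-step unfolding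
    have hinit1 : st.1.getD v.toNat 0 = (pacc G []).1 := by
      rw [(hz v (ReachG.refl v)).1]; simp [pacc]
    have hinit2 : st.2.getD v.toNat 0 = (pacc G []).1 := by
      rw [(hz v (ReachG.refl v)).2]; simp [pacc]
    obtain ⟨hR1, hR2, hRv1, hRv2, hRm, hRfin, hRunt⟩ :=
      inner (G.getD v.toNat []) [] (by simp) st 0 hl1 hl2 hinit1 hinit2 (by simp [pacc])
        (by rintro x _ ⟨e, he, _⟩; simp at he)
        (fun x _ _ _ => ⟨rfl, rfl⟩)
    rw [dfsVisit_succ, hbridge]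
    set r := ((G.getD v.toNat []).foldl (dfsStep G fuel v) (st, 0)) with hr
    have hset : PySem.List.pySetD r.1.1 v (PySem.List.pyGetD r.1.1 v 0 + r.2) =
        r.1.1.set v.toNat ((pacc G (G.getD v.toNat [])).1 + (pacc G (G.getD v.toNat [])).2) := by
      rw [PySem.List.pySetD_of_nonneg _ _ h0, pyGetD_nonneg_getD h0, hRv1, hRm]
    rw [hset]
    have hPF := PF_unfold hwf hrv
    refine ⟨by simpa using hR1, hR2, ?_, ?_⟩
    · intro x hx
      rcases reach_head hx with rfl | ⟨c, hec, hcx⟩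
      · constructor
        · rw [getD_set_self (by omega) _, hPF]
        · rw [hRv2, hPF]
      · obtain ⟨w0, hmem0⟩ := hec.2.2
        have hx0 : 0 ≤ x := (reach_mem hwf (reach_trans (ReachG.step hrv hec) hcx)).2.1
        have hxvi : x ≠ v := fun hh => no_cycle hwf hrv c hec (hh ▸ hcx)
        have hne : x.toNat ≠ v.toNat := by omega
        have := hRfin x hxvi ⟨[c, w0], hmem0, by simpa [List.headI] using hcx⟩
        rw [getD_set_ne (Ne.symm hne) _]
        exact ⟨this.1, this.2⟩
    · intro x hx0 hnr
      have hxv : x ≠ v := fun h => hnr (by rw [h]; exact ReachG.refl v)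
      have hno : ∀ e ∈ G.getD v.toNat [], ¬ ReachG G e.headI x := by
        intro e he hr2
        obtain ⟨c, w0, rfl, hc0, hcn, hedge⟩ := wf_shape hwf hrv he
        simp only [List.headI] at hr2
        exact hnr (reach_trans (edge_reach hedge) hr2)
      have := hRunt x hx0 hxv hno
      have hne : x.toNat ≠ v.toNat := by omega
      rw [getD_set_ne (Ne.symm hne) _]
      exact ⟨this.1, this.2⟩

-- ---------- B-side lemmas ----------
lemma child_list {G : List (List (List Int))} {root u : Int} (hwf : PreN root G)
    (hru : ReachG G root u) :
    (PySem.List.pyGetD G u []).foldl (fun acc e =>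
        match e with
        | [v, _] => acc ++ [v]
        | _ => acc) [] = (G.getD u.toNat []).map List.headI := by
  have h0 : (0:Int) ≤ u := (reach_mem hwf hru).2.1
  rw [pyGetD_nonneg_getD h0]
  have gen : ∀ (l : List (List Int)) (acc : List Int),
      (∀ e ∈ l, ∃ v w, e = [v, w]) →
      l.foldl (fun acc e =>
        match e with
        | [v, _] => acc ++ [v]
        | _ => acc) acc = acc ++ l.map List.headI := by
    intro l
    induction l with
    | nil => intro acc _; simp
    | cons e t ihl =>
      intro acc hsh
      obtain ⟨v, w, rfl⟩ := hsh e (by simp)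
      simp only [List.foldl_cons, List.map_cons]
      rw [ihl (acc ++ [v]) (fun e he => hsh e (by simp [he]))]
      simp [List.headI]
  rw [gen _ [] (fun e he => by
    obtain ⟨v, w, rfl, _⟩ := wf_shape hwf hru he; exact ⟨v, w, rfl⟩)]
  simp

lemma mem_child {G : List (List (List Int))} {root u c : Int} (hwf : PreN root G)
    (hru : ReachG G root u) :
    c ∈ (G.getD u.toNat []).map List.headI ↔ EdgeG G u c := by
  constructor
  · intro hc
    obtain ⟨e, he, rfl⟩ := List.mem_map.mp hc
    obtain ⟨v, w, rfl, _, _, hedge⟩ := wf_shape hwf hru he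
    simpa [List.headI] using hedge
  · rintro ⟨_, _, w, hmem⟩
    exact List.mem_map.mpr ⟨_, hmem, rfl⟩

lemma bfs_good {G : List (List (List Int))} {root : Int} (hwf : PreN root G) :
    ∀ fuel (done pending : List Int),
      (∀ x ∈ done ++ pending, ReachG G root x) →
      (done ++ pending).Nodup →
      (∀ d1 u d2, done = d1 ++ u :: d2 → ∀ c, EdgeG G u c → c ∈ d2 ++ pending) →
      (∀ x, ReachG G root x → x ∈ done ∨ ∃ y ∈ pending, ReachG G y x) →
      (∀ x ∈ done ++ pending, x = root ∨ ∃ p ∈ done, EdgeG G p x) →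
      G.length + 1 ≤ fuel + done.length →
      (∀ x, ReachG G root x ↔ x ∈ bfsOrder G fuel done pending) ∧
      (∀ d1 u d2, bfsOrder G fuel done pending = d1 ++ u :: d2 →
        ∀ c, EdgeG G u c → c ∈ d2) := by
  intro fuel
  induction fuel with
  | zero =>
    intro done pending hC1 hC2 _ _ _ hC6
    exfalso
    have hnd : done.Nodup := hC2.of_append_left
    have hbnd : ∀ x ∈ done, 0 ≤ x ∧ x < (G.length : Int) := by
      intro x hx
      exact (reach_mem hwf (hC1 x (by simp [hx]))).2
    have := nodup_int_bounded hnd hbnd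
    omega
  | succ fuel ih =>
    intro done pending hC1 hC2 hC3 hC4 hC5 hC6
    cases pending with
    | nil =>
      simp only [bfsOrder]
      constructor
      · intro x
        constructor
        · intro hx
          rcases hC4 x hx with h | ⟨y, hy, _⟩
          · exact h
          · simp at hy
        · intro hx; exact hC1 x (by simp [hx])
      · intro d1 u d2 hsplit c hc
        have := hC3 d1 u d2 hsplit c hc
        simpa using this
    | cons u rest =>
      have hru : ReachG G root u := hC1 u (by simp)
      have hub := reach_mem hwf hru
      have hu0 : (0:Int) ≤ u := hub.2.1
      have hun : u < (G.length : Int) := hub.2.2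
      have hkids := child_list hwf hru
      simp only [bfsOrder, hkids]
      have hmemk : ∀ c, c ∈ (G.getD u.toNat []).map List.headI ↔ EdgeG G u c :=
        fun c => mem_child hwf hru
      have hknd : ((G.getD u.toNat []).map List.headI).Nodup :=
        nodup_flatMap_comp _ (ReachSet G root) hwf.2.2.2.1 _ hub.1
      apply ih
      · -- C1
        intro x hx
        rcases List.mem_append.mp hx with hx | hx
        · rcases List.mem_append.mp hx with hx | hx
          · exact hC1 x (by simp [hx])
          · simp at hx; subst hx; exact hru
        · rcases List.mem_append.mp hx with hx | hx
          · exact hC1 x (by simp [hx])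
          · exact ReachG.step hru ((hmemk x).mp hx)
      · -- C2
        have hshape : (done ++ [u]) ++ (rest ++ (G.getD u.toNat []).map List.headI) =
            (done ++ u :: rest) ++ (G.getD u.toNat []).map List.headI := by
          simp
        rw [hshape, List.nodup_append]
        refine ⟨hC2, hknd, ?_⟩
        intro c hcA c' hcB hcc
        subst hcc
        have hec : EdgeG G u c := (hmemk c).mp hcB
        rcases hC5 c hcA with rfl | ⟨p, hp, hpc⟩
        · exact root_no_in hwf hru hec
        · have hrp : ReachG G root p := hC1 p (by simp [hp])
          have hpu : p = u := unique_incoming hwf hrp hru hpc hec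
          have := (List.nodup_append.mp hC2).2.2
          exact this u (hpu ▸ hp) u (by simp) rfl
      · -- C3
        intro d1 u' d2 hsplit c hc
        rcases concat_split hsplit.symm with ⟨rfl, rfl, rfl⟩ | ⟨d2', rfl, hdone⟩
        · simp only [List.nil_append]
          exact List.mem_append.mpr (Or.inr ((hmemk c).mpr hc))
        · have := hC3 d1 u' d2' hdone c hc
          rcases List.mem_append.mp this with h | h
          · exact List.mem_append.mpr (Or.inl (List.mem_append.mpr (Or.inl h)))
          · rcases List.mem_cons.mp h with rfl | h
            · exact List.mem_append.mpr (Or.inl (List.mem_append.mpr (Or.inr (by simp))))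
            · exact List.mem_append.mpr (Or.inr (List.mem_append.mpr (Or.inl h)))
      · -- C4
        intro x hx
        rcases hC4 x hx with h | ⟨y, hy, hyx⟩
        · exact Or.inl (List.mem_append.mpr (Or.inl h))
        · rcases List.mem_cons.mp hy with rfl | hy
          · rcases reach_head hyx with rfl | ⟨c, hec, hcx⟩
            · exact Or.inl (by simp)
            · exact Or.inr ⟨c, List.mem_append.mpr (Or.inr ((hmemk c).mpr hec)), hcx⟩
          · exact Or.inr ⟨y, List.mem_append.mpr (Or.inl hy), hyx⟩
      · -- C5
        intro x hx
        rcases List.mem_append.mp hx with hx | hx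
        · rcases List.mem_append.mp hx with hx | hx
          · rcases hC5 x (by simp [hx]) with h | ⟨p, hp, hpx⟩
            · exact Or.inl h
            · exact Or.inr ⟨p, by simp [hp], hpx⟩
          · have hx' : x = u := by simpa using hx
            rw [hx']
            rcases hC5 u (by simp) with h | ⟨p, hp, hpu⟩
            · exact Or.inl h
            · exact Or.inr ⟨p, by simp [hp], hpu⟩
        · rcases List.mem_append.mp hx with hx | hx
          · rcases hC5 x (by simp [hx]) with h | ⟨p, hp, hpx⟩
            · exact Or.inl h
            · exact Or.inr ⟨p, by simp [hp], hpx⟩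
          · exact Or.inr ⟨u, by simp, (hmemk x).mp hx⟩
      · -- C6
        simp only [List.length_append, List.length_cons]
        omega

lemma combine_spec {G : List (List (List Int))} {root u : Int} (hwf : PreN root G)
    (hru : ReachG G root u) (st : List Int × List Int)
    (hl1 : st.1.length = G.length) (hl2 : st.2.length = G.length)
    (hch : ∀ c, EdgeG G u c → st.1.getD c.toNat 0 = (PFv G c).1 ∧ st.2.getD c.toNat 0 = (PFv G c).2) :
    (combineStep G st u).1.length = G.length ∧
    (combineStep G st u).2.length = G.length ∧
    (combineStep G st u).1.getD u.toNat 0 = (PFv G u).1 ∧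
    (combineStep G st u).2.getD u.toNat 0 = (PFv G u).2 ∧
    (∀ j : Nat, j ≠ u.toNat →
      (combineStep G st u).1.getD j 0 = st.1.getD j 0 ∧
      (combineStep G st u).2.getD j 0 = st.2.getD j 0) := by
  have hbm := reach_mem hwf hru
  have h0 : (0:Int) ≤ u := hbm.2.1
  have hn : u < (G.length : Int) := hbm.2.2
  have hu : u.toNat < G.length := by omega
  have hfold : (PySem.List.pyGetD G u []).foldl (fun (p : Int × Int) e =>
      match e with
      | [v, w] =>
        (p.1 + PySem.List.pyGetD st.1 v 0,
         max p.2 (PySem.List.pyGetD st.2 v 0 - PySem.List.pyGetD st.1 v 0 + w))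
      | _ => p) (0, 0) = pacc G (G.getD u.toNat []) := by
    rw [pyGetD_nonneg_getD h0]
    unfold pacc
    apply foldl_congr_of_mem
    intro acc e he
    obtain ⟨v, w, rfl, hv0, hvn, hedge⟩ := wf_shape hwf hru he
    have hc := hch v hedge
    show (acc.1 + PySem.List.pyGetD st.1 v 0,
          max acc.2 (PySem.List.pyGetD st.2 v 0 - PySem.List.pyGetD st.1 v 0 + w)) =
         (acc.1 + (PFv G v).1, max acc.2 ((PFv G v).2 - (PFv G v).1 + w))
    rw [pyGetD_nonneg_getD hv0, pyGetD_nonneg_getD hv0, hc.1, hc.2]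
  have hPF := PF_unfold hwf hru
  have hcs : combineStep G st u =
      (st.1.set u.toNat ((pacc G (G.getD u.toNat [])).1 + (pacc G (G.getD u.toNat [])).2),
       st.2.set u.toNat (pacc G (G.getD u.toNat [])).1) := by
    unfold combineStep
    rw [hfold]
    show (PySem.List.pySetD st.1 u ((pacc G (G.getD u.toNat [])).1 + (pacc G (G.getD u.toNat [])).2),
          PySem.List.pySetD st.2 u (pacc G (G.getD u.toNat [])).1) = _
    rw [PySem.List.pySetD_of_nonneg st.1 _ h0, PySem.List.pySetD_of_nonneg st.2 _ h0]
  rw [hcs]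
  refine ⟨by simp [hl1], by simp [hl2], ?_, ?_, ?_⟩
  · rw [getD_set_self (by omega) _, hPF]
  · rw [getD_set_self (by omega) _, hPF]
  · intro j hj
    exact ⟨getD_set_ne (fun h => hj h.symm) _, getD_set_ne (fun h => hj h.symm) _⟩

lemma fold_values {G : List (List (List Int))} {root : Int} (hwf : PreN root G) :
    ∀ (l2 : List Int) (st : List Int × List Int),
      st.1.length = G.length → st.2.length = G.length →
      (∀ u ∈ l2, ReachG G root u) →
      (∀ m1 u m2, l2 = m1 ++ u :: m2 → ∀ c, EdgeG G u c →
        (st.1.getD c.toNat 0 = (PFv G c).1 ∧ st.2.getD c.toNat 0 = (PFv G c).2) ∨ c ∈ m1) →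
      (l2.foldl (combineStep G) st).1.length = G.length ∧
      (l2.foldl (combineStep G) st).2.length = G.length ∧
      (∀ u ∈ l2, (l2.foldl (combineStep G) st).1.getD u.toNat 0 = (PFv G u).1 ∧
                 (l2.foldl (combineStep G) st).2.getD u.toNat 0 = (PFv G u).2) ∧
      (∀ x : Int, 0 ≤ x → x ∉ l2 →
        (l2.foldl (combineStep G) st).1.getD x.toNat 0 = st.1.getD x.toNat 0 ∧
        (l2.foldl (combineStep G) st).2.getD x.toNat 0 = st.2.getD x.toNat 0) := by
  intro l2
  induction l2 with
  | nil =>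
    intro st hl1 hl2 _ _
    exact ⟨hl1, hl2, by simp, fun x _ _ => ⟨rfl, rfl⟩⟩
  | cons u t ih =>
    intro st hl1 hl2 hb hH2
    have hru : ReachG G root u := hb u (by simp)
    have hbm := reach_mem hwf hru
    have hu0 : (0:Int) ≤ u := hbm.2.1
    have hun : u < (G.length : Int) := hbm.2.2
    have hch : ∀ c, EdgeG G u c →
        st.1.getD c.toNat 0 = (PFv G c).1 ∧ st.2.getD c.toNat 0 = (PFv G c).2 := by
      intro c hc
      rcases hH2 [] u t rfl c hc with h | h
      · exact h
      · simp at h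
    obtain ⟨hcl1, hcl2, hcu1, hcu2, hcother⟩ := combine_spec hwf hru st hl1 hl2 hch
    set st' := combineStep G st u with hst'
    have hH2' : ∀ m1 u' m2, t = m1 ++ u' :: m2 → ∀ c, EdgeG G u' c →
        (st'.1.getD c.toNat 0 = (PFv G c).1 ∧ st'.2.getD c.toNat 0 = (PFv G c).2) ∨ c ∈ m1 := by
      intro m1 u' m2 hsplit c hc
      have hc0 : 0 ≤ c := by
        have hru' : ReachG G root u' := hb u' (by simp [hsplit])
        exact (edge_bounds hwf hru' hc).1
      by_cases hcu : c = u
      · left; subst hcu; exact ⟨hcu1, hcu2⟩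
      · rcases hH2 (u :: m1) u' m2 (by simp [hsplit]) c hc with h | h
        · left
          have hne : c.toNat ≠ u.toNat := by omega
          have := hcother c.toNat hne
          rw [this.1, this.2]; exact h
        · rcases List.mem_cons.mp h with h | h
          · exact absurd h hcu
          · right; exact h
    obtain ⟨hL1, hL2, hmem, hfr⟩ := ih st' hcl1 hcl2 (fun x hx => hb x (by simp [hx])) hH2'
    simp only [List.foldl_cons]
    refine ⟨hL1, hL2, ?_, ?_⟩
    · intro x hx
      rcases List.mem_cons.mp hx with rfl | hx'
      · by_cases hxt : x ∈ t
        · exact hmem x hxt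
        · have := hfr x hu0 hxt
          rw [this.1, this.2]; exact ⟨hcu1, hcu2⟩
      · exact hmem x hx'
    · intro x hx0 hx
      have hxu : x ≠ u := fun h => hx (h ▸ by simp)
      have hxt : x ∉ t := fun h => hx (by simp [h])
      have h1 := hfr x hx0 hxt
      have hne : x.toNat ≠ u.toNat := by omega
      have h2 := hcother x.toNat hne
      rw [h1.1, h1.2, h2.1, h2.2]
      exact ⟨rfl, rfl⟩


-- the two traversals compute the same arrays for a non-negative admissible root
lemma solution_eq_nonneg {root : Int} {G : List (List (List Int))} (hwf : PreN root G) :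
    solution root G = solution_alt root G := by
  have h0 := hwf.1
  have hn := hwf.2.1
  have hA : solution root G =
      dfsVisit G (G.length + 1) root
        (List.replicate G.length (0 : Int), List.replicate G.length (0 : Int)) := rfl
  have hB : solution_alt root G =
      (bfsOrder G (G.length + 1) [] [root]).reverse.foldl (combineStep G)
        (List.replicate G.length (0 : Int), List.replicate G.length (0 : Int)) := rfl
  obtain ⟨hA1, hA2, hAval, hAfr⟩ :=
    dfs_main hwf (G.length + 1) root
      (List.replicate G.length (0 : Int), List.replicate G.length (0 : Int))
      (ReachG.refl root) (suff_top hwf (ReachG.refl root)) (by simp) (by simp)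
      (fun x _ => ⟨zero_getD _ _, zero_getD _ _⟩)
  obtain ⟨hiff, horder⟩ :=
    bfs_good hwf (G.length + 1) [] [root]
      (by intro x hx; simp at hx; rw [hx]; exact ReachG.refl root)
      (by simp)
      (by intro d1 u d2 h; simp at h)
      (fun x hx => Or.inr ⟨root, by simp, hx⟩)
      (by intro x hx; simp at hx; exact Or.inl hx)
      (by simp)
  set ord := bfsOrder G (G.length + 1) [] [root] with hord
  have hb : ∀ u ∈ ord.reverse, ReachG G root u := by
    intro u hu
    exact (hiff u).mpr (List.mem_reverse.mp hu)
  have hH2 : ∀ m1 u m2, ord.reverse = m1 ++ u :: m2 → ∀ c, EdgeG G u c →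
      ((List.replicate G.length (0 : Int)).getD c.toNat 0 = (PFv G c).1 ∧
       (List.replicate G.length (0 : Int)).getD c.toNat 0 = (PFv G c).2) ∨ c ∈ m1 := by
    intro m1 u m2 hsplit c hc
    right
    have hordeq : ord = m2.reverse ++ u :: m1.reverse := by
      have := congrArg List.reverse hsplit
      simpa [List.reverse_append] using this
    have := horder _ _ _ hordeq c hc
    simpa using this
  obtain ⟨hB1, hB2, hBmem, hBfr⟩ :=
    fold_values hwf ord.reverse
      (List.replicate G.length (0 : Int), List.replicate G.length (0 : Int))
      (by simp) (by simp) hb hH2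
  rw [hA, hB]
  have hptf : ∀ j : Nat, j < G.length →
      (dfsVisit G (G.length + 1) root
        (List.replicate G.length (0 : Int), List.replicate G.length (0 : Int))).1.getD j 0 =
      (ord.reverse.foldl (combineStep G)
        (List.replicate G.length (0 : Int), List.replicate G.length (0 : Int))).1.getD j 0 ∧
      (dfsVisit G (G.length + 1) root
        (List.replicate G.length (0 : Int), List.replicate G.length (0 : Int))).2.getD j 0 =
      (ord.reverse.foldl (combineStep G)
        (List.replicate G.length (0 : Int), List.replicate G.length (0 : Int))).2.getD j 0 := by
    intro j hj
    by_cases hr : ReachG G root (j : Int)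
    · have hAv := hAval (j : Int) hr
      have hmem : (j : Int) ∈ ord.reverse := List.mem_reverse.mpr ((hiff _).mp hr)
      have hBv := hBmem (j : Int) hmem
      simp only [Int.toNat_natCast] at hAv hBv
      rw [hAv.1, hAv.2, hBv.1, hBv.2]
      exact ⟨rfl, rfl⟩
    · have hAv := hAfr (j : Int) (by positivity) hr
      have hmem : (j : Int) ∉ ord.reverse := fun hmem =>
        hr ((hiff _).mpr (List.mem_reverse.mp hmem))
      have hBv := hBfr (j : Int) (by positivity) hmem
      simp only [Int.toNat_natCast] at hAv hBv
      rw [hAv.1, hAv.2, hBv.1, hBv.2]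
      exact ⟨rfl, rfl⟩
  have e1 : (dfsVisit G (G.length + 1) root
        (List.replicate G.length (0 : Int), List.replicate G.length (0 : Int))).1 =
      (ord.reverse.foldl (combineStep G)
        (List.replicate G.length (0 : Int), List.replicate G.length (0 : Int))).1 := by
    apply List.ext_getElem (by rw [hA1, hB1])
    intro j hj1 hj2
    have hj : j < G.length := by rw [hA1] at hj1; exact hj1
    have := (hptf j hj).1
    rwa [List.getD_eq_getElem _ _ hj1, List.getD_eq_getElem _ _ hj2] at this
  have e2 : (dfsVisit G (G.length + 1) root
        (List.replicate G.length (0 : Int), List.replicate G.length (0 : Int))).2 =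
      (ord.reverse.foldl (combineStep G)
        (List.replicate G.length (0 : Int), List.replicate G.length (0 : Int))).2 := by
    apply List.ext_getElem (by rw [hA2, hB2])
    intro j hj1 hj2
    have hj : j < G.length := by rw [hA2] at hj1; exact hj1
    have := (hptf j hj).2
    rwa [List.getD_eq_getElem _ _ hj1, List.getD_eq_getElem _ _ hj2] at this
  exact Prod.ext e1 e2

-- ---------- wrap-around normalisation for a negative root ----------
lemma pyIdx_norm (n : Nat) (i : Int) (h1 : -(n:Int) ≤ i) (h2 : i < 0) :
    PySem.List.pyIdx? n i = PySem.List.pyIdx? n (i + n) := by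
  have hA : ¬ (0 ≤ i) := by omega
  have hC : 0 ≤ i + (n:Int) := by omega
  have hD : i + (n:Int) < n := by omega
  simp only [PySem.List.pyIdx?, if_neg hA, if_pos h1, if_pos hC, if_pos hD]
  congr 1; omega

lemma pyGetD_neg_norm {α : Type} {l : List α} {i : Int} {d : α} (n : Nat)
    (hlen : l.length = n) (h1 : -(n:Int) ≤ i) (h2 : i < 0) :
    PySem.List.pyGetD l i d = PySem.List.pyGetD l (i + n) d := by
  subst hlen
  simp only [PySem.List.pyGetD, PySem.List.pyGet?, pyIdx_norm l.length i h1 h2]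

lemma pySetD_neg_norm {α : Type} {l : List α} {i : Int} {v : α} (n : Nat)
    (hlen : l.length = n) (h1 : -(n:Int) ≤ i) (h2 : i < 0) :
    PySem.List.pySetD l i v = PySem.List.pySetD l (i + n) v := by
  subst hlen
  simp only [PySem.List.pySetD, PySem.List.pySet?, pyIdx_norm l.length i h1 h2]

lemma dfs_len (G : List (List (List Int))) :
    ∀ fuel (v : Int) (st : List Int × List Int),
      (dfsVisit G fuel v st).1.length = st.1.length ∧
      (dfsVisit G fuel v st).2.length = st.2.length := by
  intro fuel
  induction fuel with
  | zero => intro v st; exact ⟨rfl, rfl⟩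
  | succ fuel ih =>
    intro v st
    have hfold : ∀ (l : List (List Int)) (p : (List Int × List Int) × Int),
        (l.foldl (dfsStep G fuel v) p).1.1.length = p.1.1.length ∧
        (l.foldl (dfsStep G fuel v) p).1.2.length = p.1.2.length := by
      intro l
      induction l with
      | nil => intro p; exact ⟨rfl, rfl⟩
      | cons e t iht =>
        intro p
        rw [List.foldl_cons]
        obtain ⟨h1, h2⟩ := iht (dfsStep G fuel v p e)
        rw [h1, h2]
        match e with
        | [] => exact ⟨rfl, rfl⟩
        | [a] => exact ⟨rfl, rfl⟩
        | [c, w] =>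
          obtain ⟨g1, g2⟩ := ih c p.1
          constructor
          · show (PySem.List.pySetD (dfsVisit G fuel c p.1).1 v _).length = _
            simp [PySem.List.length_pySetD, g1]
          · show (PySem.List.pySetD (dfsVisit G fuel c p.1).2 v _).length = _
            simp [PySem.List.length_pySetD, g2]
        | a :: b :: c' :: t' => exact ⟨rfl, rfl⟩
    rw [dfsVisit_succ]
    exact ⟨by simp [PySem.List.length_pySetD, (hfold _ _).1], (hfold _ _).2⟩

lemma dfs_norm (G : List (List (List Int))) (fuel : Nat) (root : Int)
    (st : List Int × List Int) (h1 : -(G.length : Int) ≤ root) (h2 : root < 0)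
    (hl1 : st.1.length = G.length) (hl2 : st.2.length = G.length) :
    dfsVisit G fuel root st = dfsVisit G fuel (root + G.length) st := by
  cases fuel with
  | zero => rfl
  | succ fuel =>
    rw [dfsVisit_succ, dfsVisit_succ, pyGetD_neg_norm G.length rfl h1 h2]
    have hfold : ∀ (l : List (List Int)) (p : (List Int × List Int) × Int),
        p.1.1.length = G.length → p.1.2.length = G.length →
        l.foldl (dfsStep G fuel root) p = l.foldl (dfsStep G fuel (root + G.length)) p := by
      intro l
      induction l with
      | nil => intro p _ _; rfl
      | cons e t iht =>
        intro p hp1 hp2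
        rw [List.foldl_cons, List.foldl_cons]
        have hstep : dfsStep G fuel root p e = dfsStep G fuel (root + G.length) p e := by
          match e with
          | [] => rfl
          | [a] => rfl
          | [c, w] =>
            obtain ⟨g1, g2⟩ := dfs_len G fuel c p.1
            have hL1 : (dfsVisit G fuel c p.1).1.length = G.length := by rw [g1, hp1]
            have hL2 : (dfsVisit G fuel c p.1).2.length = G.length := by rw [g2, hp2]
            show ((PySem.List.pySetD (dfsVisit G fuel c p.1).1 root _,
                   PySem.List.pySetD (dfsVisit G fuel c p.1).2 root _), _) = _
            rw [pySetD_neg_norm G.length hL1 h1 h2, pySetD_neg_norm G.length hL2 h1 h2,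
                pyGetD_neg_norm G.length hL1 h1 h2, pyGetD_neg_norm G.length hL2 h1 h2]
            rfl
          | a :: b :: c' :: t' => rfl
        have hlen : (dfsStep G fuel root p e).1.1.length = G.length ∧
            (dfsStep G fuel root p e).1.2.length = G.length := by
          match e with
          | [] => exact ⟨hp1, hp2⟩
          | [a] => exact ⟨hp1, hp2⟩
          | [c, w] =>
            obtain ⟨g1, g2⟩ := dfs_len G fuel c p.1
            constructor
            · show (PySem.List.pySetD (dfsVisit G fuel c p.1).1 root _).length = _
              simp [PySem.List.length_pySetD, g1, hp1]
            · show (PySem.List.pySetD (dfsVisit G fuel c p.1).2 root _).length = _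
              simp [PySem.List.length_pySetD, g2, hp2]
          | a :: b :: c' :: t' => exact ⟨hp1, hp2⟩
        rw [← hstep, iht _ hlen.1 hlen.2]
    have hfr := hfold (PySem.List.pyGetD G (root + G.length) []) (st, 0) hl1 hl2
    rw [hfr]
    obtain ⟨gl1, gl2⟩ :
        ((PySem.List.pyGetD G (root + G.length) []).foldl
          (dfsStep G fuel (root + G.length)) (st, 0)).1.1.length = G.length ∧
        ((PySem.List.pyGetD G (root + G.length) []).foldl
          (dfsStep G fuel (root + G.length)) (st, 0)).1.2.length = G.length := by
      have hfoldlen : ∀ (l : List (List Int)) (r0 : Int) (p : (List Int × List Int) × Int),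
          p.1.1.length = G.length → p.1.2.length = G.length →
          (l.foldl (dfsStep G fuel r0) p).1.1.length = G.length ∧
          (l.foldl (dfsStep G fuel r0) p).1.2.length = G.length := by
        intro l r0
        induction l with
        | nil => intro p hp1 hp2; exact ⟨hp1, hp2⟩
        | cons e t iht =>
          intro p hp1 hp2
          rw [List.foldl_cons]
          apply iht
          · match e with
            | [] => exact hp1
            | [a] => exact hp1
            | [c, w] =>
              obtain ⟨g1, g2⟩ := dfs_len G fuel c p.1
              show (PySem.List.pySetD (dfsVisit G fuel c p.1).1 r0 _).length = _
              simp [PySem.List.length_pySetD, g1, hp1]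
            | a :: b :: c' :: t' => exact hp1
          · match e with
            | [] => exact hp2
            | [a] => exact hp2
            | [c, w] =>
              obtain ⟨g1, g2⟩ := dfs_len G fuel c p.1
              show (PySem.List.pySetD (dfsVisit G fuel c p.1).2 r0 _).length = _
              simp [PySem.List.length_pySetD, g2, hp2]
            | a :: b :: c' :: t' => exact hp2
      exact hfoldlen _ _ _ hl1 hl2
    rw [pySetD_neg_norm G.length gl1 h1 h2, pyGetD_neg_norm G.length gl1 h1 h2]

lemma combine_len (G : List (List (List Int))) (st : List Int × List Int) (u : Int) :
    (combineStep G st u).1.length = st.1.length ∧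
    (combineStep G st u).2.length = st.2.length := by
  constructor
  · show (PySem.List.pySetD st.1 u _).length = _
    simp [PySem.List.length_pySetD]
  · show (PySem.List.pySetD st.2 u _).length = _
    simp [PySem.List.length_pySetD]

lemma combfold_len (G : List (List (List Int))) :
    ∀ (l : List Int) (st : List Int × List Int),
      (l.foldl (combineStep G) st).1.length = st.1.length ∧
      (l.foldl (combineStep G) st).2.length = st.2.length := by
  intro l
  induction l with
  | nil => intro st; exact ⟨rfl, rfl⟩
  | cons u t iht =>
    intro st
    rw [List.foldl_cons]
    obtain ⟨h1, h2⟩ := iht (combineStep G st u)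
    obtain ⟨g1, g2⟩ := combine_len G st u
    exact ⟨by rw [h1, g1], by rw [h2, g2]⟩

lemma combine_norm (G : List (List (List Int))) (st : List Int × List Int) (root : Int)
    (h1 : -(G.length : Int) ≤ root) (h2 : root < 0)
    (hl1 : st.1.length = G.length) (hl2 : st.2.length = G.length) :
    combineStep G st root = combineStep G st (root + G.length) := by
  show (PySem.List.pySetD st.1 root _, PySem.List.pySetD st.2 root _) =
       (PySem.List.pySetD st.1 (root + G.length) _, PySem.List.pySetD st.2 (root + G.length) _)
  rw [pyGetD_neg_norm (l := G) G.length rfl h1 h2,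
      pySetD_neg_norm G.length hl1 h1 h2, pySetD_neg_norm G.length hl2 h1 h2]

lemma bfs_done (G : List (List (List Int))) :
    ∀ fuel (done pending : List Int),
      bfsOrder G fuel done pending = done ++ bfsOrder G fuel [] pending := by
  intro fuel
  induction fuel with
  | zero => intro done pending; simp [bfsOrder]
  | succ fuel ih =>
    intro done pending
    cases pending with
    | nil => simp [bfsOrder]
    | cons u rest =>
      show bfsOrder G fuel (done ++ [u]) _ = done ++ bfsOrder G fuel ([] ++ [u]) _
      rw [ih (done ++ [u]), ih ([] ++ [u])]
      simp

-- ===== VERDICT (by name: the statement is the Claim_ definition above) =====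
theorem solution_spec : Claim_equal_solution := by
  intro root G _ hpre
  unfold Spec_solution
  obtain ⟨hge, hlt, hok, hnd, hnt⟩ := hpre
  by_cases hneg : root < 0
  · have hnr : nroot root G = root + G.length := by simp [nroot, hneg]
    rw [hnr] at hok hnd hnt
    have hN : PreN (root + G.length) G := ⟨by omega, by omega, hok, hnd, hnt⟩
    have hA : solution root G = solution (root + G.length) G :=
      dfs_norm G (G.length + 1) root _ hge hneg (by simp) (by simp)
    have hB : solution_alt root G = solution_alt (root + G.length) G := by
      have horda : ∀ r0 : Int, bfsOrder G (G.length + 1) [] [r0] =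
          [r0] ++ bfsOrder G G.length []
            ((PySem.List.pyGetD G r0 []).foldl (fun acc e =>
              match e with
              | [v, _] => acc ++ [v]
              | _ => acc) []) := by
        intro r0
        show bfsOrder G G.length ([] ++ [r0]) _ = _
        rw [bfs_done]
        simp
      have hkids : (PySem.List.pyGetD G root []) = (PySem.List.pyGetD G (root + G.length) []) :=
        pyGetD_neg_norm G.length rfl hge hneg
      show ((bfsOrder G (G.length + 1) [] [root]).reverse).foldl (combineStep G)
            (List.replicate G.length (0 : Int), List.replicate G.length (0 : Int)) =
           ((bfsOrder G (G.length + 1) [] [root + G.length]).reverse).foldl (combineStep G)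
            (List.replicate G.length (0 : Int), List.replicate G.length (0 : Int))
      rw [horda root, horda (root + G.length), hkids]
      set T := bfsOrder G G.length []
        ((PySem.List.pyGetD G (root + G.length) []).foldl (fun acc e =>
          match e with
          | [v, _] => acc ++ [v]
          | _ => acc) []) with hT
      set init := (List.replicate G.length (0 : Int), List.replicate G.length (0 : Int)) with hinit
      have hrev : ∀ r0 : Int, (([r0] ++ T).reverse) = T.reverse ++ [r0] := by intro r0; simp
      rw [hrev root, hrev (root + G.length), List.foldl_append, List.foldl_append]
      simp only [List.foldl_cons, List.foldl_nil]
      obtain ⟨hfl1, hfl2⟩ := combfold_len G T.reverse init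
      exact combine_norm G _ root hge hneg (by rw [hfl1]; simp [hinit]) (by rw [hfl2]; simp [hinit])
    rw [hA, hB]
    exact solution_eq_nonneg hN
  · have hnr : nroot root G = root := by simp [nroot, hneg]
    rw [hnr] at hok hnd hnt
    exact solution_eq_nonneg ⟨by omega, hlt, hok, hnd, hnt⟩
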